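-- pv_equiv track=rewrite | github.com/MrBrantCode/unitest_baseline | mut_generate/mist_train_cf/cf_56062/solution.py | total_substrings
-- ===== SOURCE A (Python) =====
-- def total_substrings(s):
--     count = 0
--     for i in range(len(s)):
--         hash_map = {}
--         for j in range(i, len(s)):
--             if s[j] not in hash_map:
--                 count += 1
--                 hash_map[s[j]] = 1
--             else:
--                 break
--     return count
-- ===== SOURCE B (Python) =====
-- def total_substrings(s):
--     # Backward O(n) pass: run = length of longest distinct-char prefix starting at i,
--     # maintained via the next-occurrence dict instead of rescanning from each i.
--     next_occ = {}
--     total = 0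
--     run = 0
--     for i in range(len(s) - 1, -1, -1):
--         c = s[i]
--         if c in next_occ:
--             run = min(run + 1, next_occ[c] - i)
--         else:
--             run += 1
--         next_occ[c] = i
--         total += run
--     return total
-- ===== Notes on version B (the rewrite author's own statement) =====
-- stated objective: faster
-- what changed: Replaced the restart-a-hash-set-scan-from-every-index nested loops by a single backward pass that maintains the current run length via a next-occurrence dictionary (run(i) = min(run(i+1)+1, next_occ[s[i]]-i)).
import Mathlib
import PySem

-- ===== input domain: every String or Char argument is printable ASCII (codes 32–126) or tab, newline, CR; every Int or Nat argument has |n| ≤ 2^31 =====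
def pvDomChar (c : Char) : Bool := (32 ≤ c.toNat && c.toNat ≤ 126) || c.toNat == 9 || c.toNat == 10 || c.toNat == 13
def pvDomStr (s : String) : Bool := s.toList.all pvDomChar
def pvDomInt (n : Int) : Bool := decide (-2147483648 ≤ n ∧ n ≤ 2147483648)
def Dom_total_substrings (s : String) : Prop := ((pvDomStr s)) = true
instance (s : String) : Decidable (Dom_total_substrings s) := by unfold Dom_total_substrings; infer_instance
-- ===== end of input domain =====

-- B replaces A's quadratic restart-from-every-index scan by one backward pass
-- with a next-occurrence dictionary (asymptotically faster, measured by the check).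

-- ===== PORT A =====
-- inner loop: for j from the current position, count fresh chars, break on a repeat
def tsInner : List Char → PySem.Dict Char Int → Int → Int
  | [], _, count => count
  | c :: rest, hm, count =>
    if hm.contains c = false then tsInner rest (hm.insert c 1) (count + 1)
    else count

-- outer loop: for each start index i (each suffix), run the inner loop with a fresh dict
def tsOuter : List Char → Int → Int
  | [], count => count
  | c :: rest, count => tsOuter rest (tsInner (c :: rest) PySem.Dict.empty count)

def total_substrings (s : String) : Int := tsOuter s.toList 0

-- ===== PORT B =====
-- one backward pass; state (total, run, next_occ); head of the list is position i
def tsAltGo : List Char → Int → Int × Int × PySem.Dict Char Int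
  | [], _ => (0, 0, PySem.Dict.empty)
  | c :: rest, i =>
    let p := tsAltGo rest (i + 1)
    let run' := match p.2.2.get? c with
      | some j => min (p.2.1 + 1) (j - i)
      | none => p.2.1 + 1
    (p.1 + run', run', p.2.2.insert c i)

def total_substrings_alt (s : String) : Int := (tsAltGo s.toList 0).1

-- ===== PRECONDITION & SPEC =====
def Spec_total_substrings (s : String) (out : Int) : Prop := out = total_substrings_alt s
instance (s : String) (out : Int) : Decidable (Spec_total_substrings s out) := by unfold Spec_total_substrings; infer_instance

-- ===== CLAIM (what is proved, stated in full; the proofs are below) =====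
def Claim_equal_total_substrings : Prop := ∀ (s : String), Dom_total_substrings s → Spec_total_substrings s (total_substrings s)

-- ===== LEMMAS AND PROOFS =====

-- index of the first occurrence of c (the list's length if absent)
def pvIdx (c : Char) : List Char → Nat
  | [] => 0
  | d :: t => if d = c then 0 else pvIdx c t + 1

-- length of the longest duplicate-free prefix
def pvRun : List Char → Nat
  | [] => 0
  | c :: t => min (pvRun t) (pvIdx c t) + 1

-- sum of pvRun over all suffixes
def pvSumRun : List Char → Nat
  | [] => 0
  | c :: t => pvRun (c :: t) + pvSumRun t

-- count of fresh chars taken before hitting one in `seen` or a repeat (A's inner loop, abstractly)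
def pvGreedy : List Char → List Char → Nat
  | [], _ => 0
  | c :: t, seen => if c ∈ seen then 0 else pvGreedy t (c :: seen) + 1

theorem pvRun_le_length (l : List Char) : pvRun l ≤ l.length := by
  induction l with
  | nil => simp [pvRun]
  | cons c t ih => simp only [pvRun, List.length_cons]; omega

theorem pvIdx_of_not_mem (c : Char) (l : List Char) (h : c ∉ l) : pvIdx c l = l.length := by
  induction l with
  | nil => rfl
  | cons d t ih =>
    simp only [List.mem_cons, not_or] at h
    simp only [pvIdx, List.length_cons]
    rw [if_neg (by exact fun hd => h.1 hd.symm), ih h.2]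

theorem pvGreedy_congr (l : List Char) : ∀ s1 s2 : List Char,
    (∀ x, x ∈ s1 ↔ x ∈ s2) → pvGreedy l s1 = pvGreedy l s2 := by
  induction l with
  | nil => intro s1 s2 _; rfl
  | cons c t ih =>
    intro s1 s2 h
    simp only [pvGreedy]
    by_cases hc : c ∈ s1
    · rw [if_pos hc, if_pos ((h c).1 hc)]
    · rw [if_neg hc, if_neg (fun hc2 => hc ((h c).2 hc2))]
      rw [ih (c :: s1) (c :: s2) (fun x => by simp [h x])]

theorem pvGreedy_cons_seen (l : List Char) : ∀ (c : Char) (seen : List Char),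
    pvGreedy l (c :: seen) = min (pvGreedy l seen) (pvIdx c l) := by
  induction l with
  | nil => intro c seen; simp [pvGreedy, pvIdx]
  | cons d t ih =>
    intro c seen
    by_cases hdc : d = c
    · have h1 : pvGreedy (d :: t) (c :: seen) = 0 := by simp [pvGreedy, hdc]
      have h2 : pvIdx c (d :: t) = 0 := by simp [pvIdx, hdc]
      rw [h1, h2]
      omega
    · by_cases hds : d ∈ seen
      · have h1 : pvGreedy (d :: t) (c :: seen) = 0 := by simp [pvGreedy, hds]
        have h2 : pvGreedy (d :: t) seen = 0 := by simp [pvGreedy, hds]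
        rw [h1, h2]
        omega
      · have hL : pvGreedy (d :: t) (c :: seen) = pvGreedy t (d :: c :: seen) + 1 := by
          simp [pvGreedy, hdc, hds]
        have hR1 : pvGreedy (d :: t) seen = pvGreedy t (d :: seen) + 1 := by
          simp [pvGreedy, hds]
        have hR2 : pvIdx c (d :: t) = pvIdx c t + 1 := by simp [pvIdx, hdc]
        have hswap : pvGreedy t (d :: c :: seen) = pvGreedy t (c :: d :: seen) :=
          pvGreedy_congr t _ _ (fun x => by simp; tauto)
        rw [hL, hR1, hR2, hswap, ih c (d :: seen)]
        omega

theorem pvGreedy_nil_eq_run (l : List Char) : pvGreedy l [] = pvRun l := by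
  induction l with
  | nil => rfl
  | cons c t ih =>
    simp only [pvGreedy, pvRun, List.not_mem_nil, if_false]
    rw [pvGreedy_cons_seen, ih]

theorem tsInner_eq (l : List Char) : ∀ (hm : PySem.Dict Char Int) (count : Int),
    tsInner l hm count = count + (pvGreedy l hm.keys : Int) := by
  induction l with
  | nil => intro hm count; simp [tsInner, pvGreedy]
  | cons c t ih =>
    intro hm count
    simp only [tsInner, pvGreedy]
    by_cases hc : c ∈ hm.keys
    · have hct : hm.contains c = true := (PySem.Dict.contains_iff_mem_keys hm c).2 hc
      rw [if_neg (by simp [hct]), if_pos hc]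
      simp
    · have hcf : hm.contains c = false := by
        cases h : hm.contains c
        · rfl
        · exact absurd ((PySem.Dict.contains_iff_mem_keys hm c).1 h) hc
      rw [if_pos hcf, if_neg hc, ih]
      have hk : pvGreedy t (hm.insert c 1).keys = pvGreedy t (c :: hm.keys) :=
        pvGreedy_congr t _ _ (fun x => by
          rw [PySem.Dict.mem_keys_insert]; simp)
      rw [hk]
      push_cast
      ring

theorem tsOuter_eq (l : List Char) : ∀ count : Int,
    tsOuter l count = count + (pvSumRun l : Int) := by
  induction l with
  | nil => intro count; simp [tsOuter, pvSumRun]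
  | cons c t ih =>
    intro count
    simp only [tsOuter, pvSumRun]
    rw [ih, tsInner_eq]
    rw [PySem.Dict.keys_empty, pvGreedy_nil_eq_run]
    push_cast
    ring

theorem tsAltGo_spec (l : List Char) : ∀ i : Int,
    (tsAltGo l i).1 = (pvSumRun l : Int) ∧ (tsAltGo l i).2.1 = (pvRun l : Int) ∧
    ∀ c : Char, (tsAltGo l i).2.2.get? c =
      if c ∈ l then some (i + (pvIdx c l : Int)) else none := by
  induction l with
  | nil =>
    intro i
    refine ⟨rfl, rfl, fun c => ?_⟩
    simp [tsAltGo, PySem.Dict.get?_empty]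
  | cons c t ih =>
    intro i
    obtain ⟨ht, hr, hd⟩ := ih (i + 1)
    have hrun' :
        (match (tsAltGo t (i + 1)).2.2.get? c with
          | some j => min ((tsAltGo t (i + 1)).2.1 + 1) (j - i)
          | none => (tsAltGo t (i + 1)).2.1 + 1) = (pvRun (c :: t) : Int) := by
      rw [hd c, hr]
      by_cases hc : c ∈ t
      · rw [if_pos hc]
        simp only [pvRun, Nat.cast_add, Nat.cast_min, Nat.cast_one]
        rw [show i + 1 + (pvIdx c t : Int) - i = (pvIdx c t : Int) + 1 by ring]
        rcases le_total ((pvRun t : Int)) ((pvIdx c t : Int)) with h | h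
        · rw [min_eq_left (by omega), min_eq_left h]
        · rw [min_eq_right (by omega), min_eq_right h]
      · rw [if_neg hc]
        simp only [pvRun, pvIdx_of_not_mem c t hc, Nat.cast_add, Nat.cast_min, Nat.cast_one]
        have h := pvRun_le_length t
        rw [min_eq_left (by exact_mod_cast h)]
    refine ⟨?_, ?_, ?_⟩
    · show (tsAltGo t (i + 1)).1 + _ = _
      rw [ht, hrun']
      simp only [pvSumRun]
      push_cast
      ring
    · exact hrun'
    · intro x
      show ((tsAltGo t (i + 1)).2.2.insert c i).get? x = _
      rw [PySem.Dict.get?_insert]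
      by_cases hx : x = c
      · subst hx
        simp [pvIdx]
      · have hcx : ¬ c = x := fun h => hx h.symm
        rw [if_neg hx, hd x]
        by_cases hxt : x ∈ t
        · rw [if_pos hxt, if_pos (List.mem_cons_of_mem c hxt)]
          simp only [pvIdx, if_neg hcx]
          congr 1
          push_cast
          ring
        · rw [if_neg hxt, if_neg (by simp [hx, hxt])]

-- ===== VERDICT (by name: the statement is the Claim_ definition above) =====
theorem total_substrings_spec : Claim_equal_total_substrings := by
  intro s _
  show total_substrings s = total_substrings_alt s
  unfold total_substrings total_substrings_alt
  rw [tsOuter_eq, (tsAltGo_spec s.toList 0).1]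
  simp
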